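-- pv_equiv track=rewrite | github.com/OJamals/UIdetox | uidetox/subagent.py | _shard_items
-- ===== SOURCE A (Python) =====
-- def _coerce_parallel(parallel: int) -> int:
--     return max(1, int(parallel or 1))
--
-- def _shard_items(items: list, parallel: int) -> list[list]:
--     """Distribute items round-robin into balanced non-empty shards.
--
--     For backward compatibility this function is still available.
--     Use ``_shard_items_by_workload`` for complexity-aware sharding.
--     """
--     shard_count = min(len(items), _coerce_parallel(parallel))
--     if shard_count <= 0:
--         return []
--     shards: list[list] = [[] for _ in range(shard_count)]
--     for idx, item in enumerate(items):
--         shards[idx % shard_count].append(item)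
--     return [shard for shard in shards if shard]
-- ===== SOURCE B (Python) =====
-- def _shard_items(items: list, parallel: int) -> list[list]:
--     """Strided (column-wise) sharding: shard i is items[i::shard_count]."""
--     shard_count = min(len(items), max(1, int(parallel or 1)))
--     if shard_count == 0:
--         return []
--     return [items[i::shard_count] for i in range(shard_count)]
-- ===== Notes on version B (the rewrite author's own statement) =====
-- stated objective: simpler
-- what changed: Replaces the per-item round-robin dispatch (enumerate + idx % shard_count append into pre-built empty shards, then a non-empty filter) by a column-wise gather: shard i is the strided slice items[i::shard_count], so no mutable shard table and no filter are needed.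
import Mathlib
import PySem

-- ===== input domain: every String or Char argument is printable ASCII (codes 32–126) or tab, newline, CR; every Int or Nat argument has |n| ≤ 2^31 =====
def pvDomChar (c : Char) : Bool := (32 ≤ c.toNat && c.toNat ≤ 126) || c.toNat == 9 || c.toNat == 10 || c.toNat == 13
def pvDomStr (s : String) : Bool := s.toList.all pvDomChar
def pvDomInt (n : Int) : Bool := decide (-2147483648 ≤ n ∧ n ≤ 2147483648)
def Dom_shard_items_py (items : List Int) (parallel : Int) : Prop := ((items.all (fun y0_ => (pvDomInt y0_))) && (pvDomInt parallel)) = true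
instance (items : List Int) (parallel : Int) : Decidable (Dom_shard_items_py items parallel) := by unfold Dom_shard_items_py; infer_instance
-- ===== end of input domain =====

-- B replaces A's per-item round-robin dispatch (enumerate + idx % shard_count appends into a
-- mutable shard table, then a non-empty filter) by a column-wise gather: shard i is the strided
-- slice items[i::shard_count]; objective: simpler.

-- ===== PORT A =====
-- _coerce_parallel: max(1, int(parallel or 1)); 'parallel or 1' = parallel if nonzero else 1
def pvCoerceParallel (parallel : Int) : Int := max 1 (if parallel = 0 then 1 else parallel)

def shard_items_py (items : List Int) (parallel : Int) : List (List Int) :=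
  let shard_count : Int := min ((items.length : Int)) (pvCoerceParallel parallel)
  if shard_count ≤ 0 then []
  else
    -- shards = [[] for _ in range(shard_count)]
    let shards : List (List Int) := (PySem.List.pyRange 0 shard_count 1).map (fun _ => [])
    -- for idx, item in enumerate(items): shards[idx % shard_count].append(item)
    -- (.toNat is exact here: 0 ≤ idx % shard_count because shard_count > 0 in this branch)
    let shards := (PySem.List.enumerate items 0).foldl
      (fun sh p => sh.modify (PySem.Int.mod p.1 shard_count).toNat (fun t => t ++ [p.2])) shards
    -- [shard for shard in shards if shard]
    shards.filter (fun s => !s.isEmpty)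

-- ===== PORT B =====
def shard_items_py_alt (items : List Int) (parallel : Int) : List (List Int) :=
  let shard_count : Int := min ((items.length : Int)) (max 1 (if parallel = 0 then 1 else parallel))
  if shard_count = 0 then []
  -- [items[i::shard_count] for i in range(shard_count)]
  -- (.getD [] is exact: slice? is some because shard_count ≠ 0, Python never raises here)
  else (PySem.List.pyRange 0 shard_count 1).map
    (fun i => (PySem.List.slice? items (some i) none shard_count).getD [])

-- ===== PRECONDITION & SPEC =====
def Spec_shard_items_py (items : List Int) (parallel : Int) (out : List (List Int)) : Prop := out = shard_items_py_alt items parallel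
instance (items : List Int) (parallel : Int) (out : List (List Int)) : Decidable (Spec_shard_items_py items parallel out) := by unfold Spec_shard_items_py; infer_instance

-- ===== CLAIM (what is proved, stated in full; the proofs are below) =====
def Claim_equal_shard_items_py : Prop := ∀ (items : List Int) (parallel : Int), Dom_shard_items_py items parallel → Spec_shard_items_py items parallel (shard_items_py items parallel)

-- ===== LEMMAS AND PROOFS =====

-- the indices of shard j: positions p < n with p % k = j
def pvSel (k j n : Nat) : List Nat := (List.range n).filter (fun p => p % k = j)

-- reading a list back off by getD over its index range
theorem pv_map_getD_range {α : Type} (d : α) (l : List α) :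
    (List.range l.length).map (fun j => l.getD j d) = l := by
  apply List.ext_getElem
  · simp
  · intro i h1 h2
    simp [List.getD_eq_getElem?_getD, List.getElem?_eq_getElem h2]

-- A's round-robin fold, characterised per shard index
theorem pv_foldl_rr (k : Nat) :
    ∀ (rest : List Int) (s : Nat) (sh : List (List Int)),
    (PySem.List.enumerate rest (s : Int)).foldl
        (fun sh p => sh.modify (PySem.Int.mod p.1 (k : Int)).toNat (fun t => t ++ [p.2])) sh
      = (List.range sh.length).map
          (fun j => sh.getD j [] ++
            (((List.range rest.length).filter (fun p => (s + p) % k = j)).map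
              (fun p => rest.getD p 0))) := by
  intro rest
  induction rest with
  | nil =>
    intro s sh
    simpa [PySem.List.enumerate] using (pv_map_getD_range [] sh).symm
  | cons x xs ih =>
    intro s sh
    rw [PySem.List.enumerate_cons]
    have hcast : ((s : Int) + 1) = ((s + 1 : Nat) : Int) := by push_cast; ring
    simp only [List.foldl_cons, hcast, PySem.Int.mod_natCast, Int.toNat_natCast]
    rw [ih (s + 1) (sh.modify (s % k) (fun t => t ++ [x]))]
    rw [List.length_modify]
    apply List.map_congr_left
    intro j hj
    have hj' : j < sh.length := List.mem_range.mp hj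
    have hmod : (sh.modify (s % k) (fun t => t ++ [x])).getD j []
        = if s % k = j then sh.getD j [] ++ [x] else sh.getD j [] := by
      simp only [List.getD_eq_getElem?_getD, List.getElem?_modify,
        List.getElem?_eq_getElem hj']
      by_cases h : s % k = j <;> simp [h]
    rw [hmod]
    -- unfold one step of the selected-index list for x :: xs
    have h1 : (fun p => decide ((s + p) % k = j)) ∘ Nat.succ
          = (fun p => decide ((s + 1 + p) % k = j)) := by
      funext p
      simp only [Function.comp_apply]
      rw [show s + p.succ = s + 1 + p from by omega]
    have hsel : ((List.range (x :: xs).length).filter (fun p => (s + p) % k = j)).map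
          (fun p => (x :: xs).getD p 0)
        = (if s % k = j then [x] else []) ++
          (((List.range xs.length).filter (fun p => (s + 1 + p) % k = j)).map
            (fun p => xs.getD p 0)) := by
      rw [List.length_cons, List.range_succ_eq_map, List.filter_cons, List.filter_map, h1]
      by_cases h : s % k = j
      · simp [h, List.map_map, Function.comp_def]
      · simp [h, List.map_map, Function.comp_def]
    rw [hsel]
    by_cases h : s % k = j <;> simp [h, List.append_assoc]

-- helper: filterMap that always hits `some` is a map
theorem pv_filterMap_eq_map {α β : Type} (f : α → Option β) (g : α → β) :
    ∀ (l : List α), (∀ a ∈ l, f a = some (g a)) → l.filterMap f = l.map g := by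
  intro l
  induction l with
  | nil => intro _; rfl
  | cons x xs ih =>
    intro h
    rw [List.filterMap_cons, h x (List.mem_cons_self), List.map_cons,
      ih (fun a ha => h a (List.mem_cons_of_mem _ ha))]

-- membership characterisation of the arithmetic progression
theorem pv_mem_iff (k j n p : Nat) (hk : 0 < k) (hj : j < k) :
    (p < n ∧ p % k = j) ↔ ∃ m, m < (n + k - 1 - j) / k ∧ j + k * m = p := by
  constructor
  · rintro ⟨hpn, hpj⟩
    obtain ⟨q, r, hr, heq⟩ : ∃ q r, r < k ∧ p = k * q + r :=
      ⟨p / k, p % k, Nat.mod_lt _ hk, (Nat.div_add_mod p k).symm⟩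
    have hrj : r = j := by
      rw [heq, Nat.mul_add_mod] at hpj
      rw [← hpj, Nat.mod_eq_of_lt hr]
    refine ⟨q, ?_, by omega⟩
    rw [Nat.lt_iff_add_one_le, Nat.le_div_iff_mul_le hk, Nat.add_mul, Nat.one_mul,
      Nat.mul_comm q k]
    omega
  · rintro ⟨m, hm, hp⟩
    rw [Nat.lt_iff_add_one_le, Nat.le_div_iff_mul_le hk, Nat.add_mul, Nat.one_mul,
      Nat.mul_comm m k] at hm
    refine ⟨by omega, ?_⟩
    rw [← hp, Nat.add_mul_mod_self_left]
    exact Nat.mod_eq_of_lt hj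

-- the selected indices form the arithmetic progression j, j+k, j+2k, …
theorem pv_sel_prog (k j n : Nat) (hk : 0 < k) (hj : j < k) :
    pvSel k j n = (List.range ((n + k - 1 - j) / k)).map (fun m => j + k * m) := by
  refine List.eq_of_perm_of_sorted (le := (· < ·))
    (fun a b _ _ h1 h2 => absurd h2 (Nat.lt_asymm h1))
    (List.Pairwise.filter _ List.pairwise_lt_range)
    (List.pairwise_map.mpr (List.pairwise_lt_range.imp (fun hab => by
      have := (Nat.mul_lt_mul_left hk).mpr hab
      omega)))
    ((List.perm_ext_iff_of_nodup
      (List.Nodup.filter _ List.nodup_range)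
      (List.nodup_range.map (fun a b h => Nat.eq_of_mul_eq_mul_left hk (by omega)))).mpr
      (fun p => by
        simp only [List.mem_filter, List.mem_range, List.mem_map, decide_eq_true_eq]
        exact pv_mem_iff k j n p hk hj))

-- B's strided slice items[j::k] equals shard j's selected elements
theorem pv_slice_eq_sel (items : List Int) (k j : Nat) (hk : 0 < k)
    (hj : j < k) (hjn : j < items.length) :
    (PySem.List.slice? items (some (j : Int)) none (k : Int)).getD []
      = (pvSel k j items.length).map (fun p => items.getD p 0) := by
  have hsi : PySem.List.sliceIndices items.length (some (j : Int)) none (k : Int)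
      = ((j : Int), (items.length : Int), (k : Int)) := by
    simp only [PySem.List.sliceIndices, show ¬((k : Int) < 0) from by omega,
      if_false, show ¬((j : Int) < 0) from by omega]
    rw [min_eq_left (by exact_mod_cast hjn.le)]
  rw [PySem.List.slice?, if_neg (show ¬((k : Int) = 0) from by omega), hsi]
  simp only [show (0 : Int) < (k : Int) from by exact_mod_cast hk,
    show ((j : Int)) < (items.length : Int) from by exact_mod_cast hjn, Option.getD_some]
  have hcnt : (((items.length : Int) - (j : Int) + (k : Int) - 1) / (k : Int)).toNat
      = (items.length + k - 1 - j) / k := by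
    rw [show ((items.length : Int) - (j : Int) + (k : Int) - 1)
        = ((items.length + k - 1 - j : Nat) : Int) from by omega,
      ← Int.natCast_div, Int.toNat_natCast]
  rw [hcnt, pv_sel_prog k j items.length hk hj, List.map_map]
  apply pv_filterMap_eq_map
  intro m hm
  have hm' : m < (items.length + k - 1 - j) / k := List.mem_range.mp hm
  have hlt : j + k * m < items.length :=
    ((pv_mem_iff k j items.length (j + k * m) hk hj).mpr ⟨m, hm', rfl⟩).1
  have hidx : (((j : Int)) + (k : Int) * (m : Int)).toNat = j + k * m := by
    rw [show ((j : Int)) + (k : Int) * (m : Int) = ((j + k * m : Nat) : Int) from by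
      push_cast; ring, Int.toNat_natCast]
  rw [hidx, List.getElem?_eq_getElem hlt]
  simp [List.getD_eq_getElem?_getD, List.getElem?_eq_getElem hlt]

theorem shard_items_py_spec : Claim_equal_shard_items_py := by
  intro items parallel _
  unfold Spec_shard_items_py shard_items_py shard_items_py_alt pvCoerceParallel
  set c : Int := max 1 (if parallel = 0 then 1 else parallel) with hc
  have hc1 : 1 ≤ c := le_max_left _ _
  set sc : Int := min ((items.length : Int)) c with hscdef
  by_cases hsc0 : sc ≤ 0
  · have h0 : sc = 0 := by omega
    rw [h0]
    norm_num
  · have hscpos : 0 < sc := by omega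
    rw [if_neg hsc0, if_neg (by omega)]
    dsimp only
    set k : Nat := sc.toNat with hkdef
    have hksc : sc = (k : Int) := (Int.toNat_of_nonneg (by omega)).symm
    have hk : 0 < k := by omega
    have hkn : k ≤ items.length := by
      have : sc ≤ (items.length : Int) := min_le_left _ _
      omega
    rw [hksc]
    -- normalise the two range scaffolds
    have hrange : PySem.List.pyRange 0 (k : Int) 1 = (List.range k).map (fun m => ((m : Nat) : Int)) := by
      rw [PySem.List.pyRange_one]
      simp
    -- A side
    rw [hrange, List.map_map]
    have hinit : ((List.range k).map ((fun _ => ([] : List Int)) ∘ (fun m => ((m : Nat) : Int))))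
        = List.replicate k ([] : List Int) := by
      rw [show ((fun _ => ([] : List Int)) ∘ (fun m : Nat => ((m : Nat) : Int))) = (fun _ => ([] : List Int)) from rfl,
        List.map_const', List.length_range]
    rw [hinit]
    rw [show ((0 : Int)) = (((0 : Nat) : Int)) from rfl, pv_foldl_rr k items 0 (List.replicate k [])]
    rw [List.length_replicate]
    -- B side
    rw [List.map_map]
    have hA : (List.range k).map
          (fun j => (List.replicate k ([] : List Int)).getD j [] ++
            ((List.range items.length).filter (fun p => (0 + p) % k = j)).map
              (fun p => items.getD p 0))
        = (List.range k).map (fun j => (pvSel k j items.length).map (fun p => items.getD p 0)) := by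
      apply List.map_congr_left
      intro j hj
      simp only [pvSel, Nat.zero_add, List.getD_eq_getElem?_getD, List.getElem?_replicate]
      split
      · simp
      · simp
    rw [hA]
    have hfilter : ((List.range k).map
          (fun j => (pvSel k j items.length).map (fun p => items.getD p 0))).filter
            (fun s => !s.isEmpty)
        = (List.range k).map (fun j => (pvSel k j items.length).map (fun p => items.getD p 0)) := by
      apply List.filter_eq_self.mpr
      intro a ha
      obtain ⟨j, hj, rfl⟩ := List.mem_map.mp ha
      have hjk : j < k := List.mem_range.mp hj
      have hjn : j < items.length := lt_of_lt_of_le hjk hkn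
      have hmem : j ∈ pvSel k j items.length :=
        List.mem_filter.mpr ⟨List.mem_range.mpr hjn, by simp [Nat.mod_eq_of_lt hjk]⟩
      have hne : (pvSel k j items.length).map (fun p => items.getD p 0) ≠ [] :=
        List.ne_nil_of_mem (List.mem_map_of_mem hmem)
      simpa using hne
    rw [hfilter]
    apply Eq.symm
    apply List.map_congr_left
    intro j hj
    have hjk : j < k := List.mem_range.mp hj
    exact pv_slice_eq_sel items k j hk hjk (lt_of_lt_of_le hjk hkn)
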